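-- pv_equiv track=rewrite | github.com/ML-Leslie/2025_SYSU_AI_EXPERIMENT | 03_24_lab/task1/处处碰壁/A/A_star_jipai.py | enhanced_heuristic
-- ===== SOURCE A (Python) =====
-- goal = ((1, 2, 3, 4), (5, 6, 7, 8), (9, 10, 11, 12), (13, 14, 15, 0))
--
-- def enhanced_heuristic(state):
--     """
--     增强的启发式函数，结合曼哈顿距离和线性冲突
--     """
--     # 基础曼哈顿距离
--     distance = manhattan_heuristic(state)
--
--     # 线性冲突计算
--     conflicts = 0
--
--     # 预先计算目标位置
--     goal_positions = {}
--     for i in range(4):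
--         for j in range(4):
--             goal_positions[goal[i][j]] = (i, j)
--
--     # 检查行冲突
--     for i in range(4):
--         for j in range(4):
--             if state[i][j] == 0:
--                 continue
--             gi, gj = goal_positions[state[i][j]]
--             if gi == i:  # 该数字在正确的行上
--                 for k in range(j + 1, 4):
--                     if state[i][k] != 0:
--                         gki, gkj = goal_positions[state[i][k]]
--                         # 如果另一个数字也在正确的行上，但相对顺序错误
--                         if gki == i and gkj < gj:
--                             conflicts += 1
--
--     # 检查列冲突
--     for j in range(4):
--         for i in range(4):
--             if state[i][j] == 0:
--                 continue
--             gi, gj = goal_positions[state[i][j]]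
--             if gj == j:  # 该数字在正确的列上
--                 for k in range(i + 1, 4):
--                     if state[k][j] != 0:
--                         gki, gkj = goal_positions[state[k][j]]
--                         # 如果另一个数字也在正确的列上，但相对顺序错误
--                         if gkj == j and gki < gi:
--                             conflicts += 1
--
--     # 每个线性冲突至少需要2次额外移动
--     return distance + 2 * conflicts
--
-- def manhattan_heuristic(state):
--     # 计算每个方块到其目标位置的曼哈顿距离总和
--     distance = 0
--     # 预先计算目标位置
--     goal_positions = {}
--     for i in range(4):
--         for j in range(4):
--             goal_positions[goal[i][j]] = (i, j)
--
--     # 计算每个数字的曼哈顿距离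
--     for i in range(4):
--         for j in range(4):
--             if state[i][j] != 0:  # 不计算空格
--                 gi, gj = goal_positions[state[i][j]]
--                 distance += abs(i - gi) + abs(j - gj)
--     return distance
-- ===== SOURCE B (Python) =====
-- def _gp(v):
--     # goal position of tile v: closed form; the blank 0 sits at (3, 3)
--     return ((v - 1) // 4, (v - 1) % 4) if v else (3, 3)
--
-- def _bucket_conflicts(vals, line, axis):
--     # counting-register scan over one line: c0..c3 count the in-line tiles seen
--     # so far whose goal index along the line is 0..3; a new in-line tile with
--     # goal index g picks up the registers above g (tiles that must end up
--     # before it but were seen after... i.e. already-seen tiles with larger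
--     # goal index), so no pair of tiles is ever compared directly.
--     c0 = c1 = c2 = c3 = 0
--     conf = 0
--     for v in vals:
--         if v != 0:
--             g = _gp(v)
--             if g[axis] == line:
--                 gpos = g[1 - axis]
--                 if gpos == 0:
--                     conf += c1 + c2 + c3
--                     c0 += 1
--                 elif gpos == 1:
--                     conf += c2 + c3
--                     c1 += 1
--                 elif gpos == 2:
--                     conf += c3
--                     c2 += 1
--                 else:
--                     c3 += 1
--     return conf
--
-- def enhanced_heuristic(state):
--     dist = 0
--     conf = 0
--     for t in range(4):
--         for j in range(4):
--             v = state[t][j]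
--             if v != 0:
--                 gi, gj = _gp(v)
--                 dist += abs(t - gi) + abs(j - gj)
--         conf += _bucket_conflicts([state[t][j] for j in range(4)], t, 0)
--         conf += _bucket_conflicts([state[i][t] for i in range(4)], t, 1)
--     return dist + 2 * conf
-- ===== Notes on version B (the rewrite author's own statement) =====
-- stated objective: alternative
-- what changed: B drops A's goal-position dict and the pairwise inner scans entirely: goal positions come from a closed-form divmod, and each line's conflicts are counted by a counting-register scan (c0..c3 = in-line tiles seen per goal index; each new in-line tile adds the registers above its goal index), fused into one loop over t that handles row t and column t.
-- outside the precondition, e.g. on enhanced_heuristic(((1, 2, 3, 4), (5, 6, 7, 8), (9, 10, 11, 12), (13, 14, 16, 0))): A raises KeyError, B returns 1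
import Mathlib
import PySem

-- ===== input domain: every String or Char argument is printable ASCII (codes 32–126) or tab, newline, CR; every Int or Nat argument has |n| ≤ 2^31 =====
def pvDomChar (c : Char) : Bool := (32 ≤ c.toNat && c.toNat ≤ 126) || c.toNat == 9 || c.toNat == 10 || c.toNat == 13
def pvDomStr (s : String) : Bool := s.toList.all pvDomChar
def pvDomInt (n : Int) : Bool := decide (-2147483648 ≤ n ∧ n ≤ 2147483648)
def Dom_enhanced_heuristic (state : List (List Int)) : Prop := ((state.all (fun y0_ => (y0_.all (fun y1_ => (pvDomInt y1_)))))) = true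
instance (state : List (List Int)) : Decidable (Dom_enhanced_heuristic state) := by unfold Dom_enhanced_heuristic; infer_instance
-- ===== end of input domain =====

-- B replaces A's goal-position dict by a closed-form divmod and A's pairwise inner scans by a
-- counting-register scan per line (no pair of tiles is ever compared), fused over one line index.

-- ===== PORT A =====
def pvGoal : List (List Int) := [[1,2,3,4],[5,6,7,8],[9,10,11,12],[13,14,15,0]]

-- goal_positions dict, built by the same double loop A uses (A builds it identically in both functions)
def pvGoalPositions : PySem.Dict Int (Int × Int) :=
  (PySem.List.pyRange 0 4 1).foldl (fun d i =>
    (PySem.List.pyRange 0 4 1).foldl (fun d j =>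
      d.insert (PySem.List.pyGetD (PySem.List.pyGetD pvGoal i []) j 0) (i, j)) d)
    PySem.Dict.empty

def manhattan_heuristic (state : List (List Int)) : Int :=
  (PySem.List.pyRange 0 4 1).foldl (fun dist i =>
    (PySem.List.pyRange 0 4 1).foldl (fun dist j =>
      let v := PySem.List.pyGetD (PySem.List.pyGetD state i []) j 0
      if v ≠ 0 then
        let g := (pvGoalPositions.get? v).getD (0, 0)
        dist + |i - g.1| + |j - g.2|
      else dist) dist) 0

def enhanced_heuristic (state : List (List Int)) : Int :=
  let distance := manhattan_heuristic state
  let conflicts : Int :=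
    (PySem.List.pyRange 0 4 1).foldl (fun c i =>
      (PySem.List.pyRange 0 4 1).foldl (fun c j =>
        let v := PySem.List.pyGetD (PySem.List.pyGetD state i []) j 0
        if v = 0 then c
        else
          let g := (pvGoalPositions.get? v).getD (0, 0)
          if g.1 = i then
            (PySem.List.pyRange (j+1) 4 1).foldl (fun c k =>
              let w := PySem.List.pyGetD (PySem.List.pyGetD state i []) k 0
              if w ≠ 0 then
                let gk := (pvGoalPositions.get? w).getD (0, 0)
                if gk.1 = i ∧ gk.2 < g.2 then c + 1 else c
              else c) c
          else c) c) 0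
  let conflicts : Int :=
    (PySem.List.pyRange 0 4 1).foldl (fun c j =>
      (PySem.List.pyRange 0 4 1).foldl (fun c i =>
        let v := PySem.List.pyGetD (PySem.List.pyGetD state i []) j 0
        if v = 0 then c
        else
          let g := (pvGoalPositions.get? v).getD (0, 0)
          if g.2 = j then
            (PySem.List.pyRange (i+1) 4 1).foldl (fun c k =>
              let w := PySem.List.pyGetD (PySem.List.pyGetD state k []) j 0
              if w ≠ 0 then
                let gk := (pvGoalPositions.get? w).getD (0, 0)
                if gk.2 = j ∧ gk.1 < g.1 then c + 1 else c
              else c) c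
          else c) c) conflicts
  distance + 2 * conflicts

-- ===== PORT B =====
-- _gp(v): closed-form goal position (ternary on v)
def gpAlt (v : Int) : Int × Int :=
  if v ≠ 0 then (PySem.Int.floordiv (v - 1) 4, PySem.Int.mod (v - 1) 4) else (3, 3)

-- _bucket_conflicts: counting-register scan; state s = (c0, c1, c2, c3, conf).
-- Python's tuple indexing g[axis] / g[1 - axis] is ported by hand as a conditional on the
-- integer axis (exact for the 0/1 axis values this program uses).
def bucketConflicts (vals : List Int) (line : Int) (axis : Int) : Int :=
  (vals.foldl (fun (s : Int × Int × Int × Int × Int) v =>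
      if v ≠ 0 then
        let g := gpAlt v
        if (if axis = 0 then g.1 else g.2) = line then
          let gpos := if 1 - axis = 0 then g.1 else g.2
          if gpos = 0 then
            (s.1 + 1, s.2.1, s.2.2.1, s.2.2.2.1, s.2.2.2.2 + (s.2.1 + s.2.2.1 + s.2.2.2.1))
          else if gpos = 1 then
            (s.1, s.2.1 + 1, s.2.2.1, s.2.2.2.1, s.2.2.2.2 + (s.2.2.1 + s.2.2.2.1))
          else if gpos = 2 then
            (s.1, s.2.1, s.2.2.1 + 1, s.2.2.2.1, s.2.2.2.2 + s.2.2.2.1)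
          else
            (s.1, s.2.1, s.2.2.1, s.2.2.2.1 + 1, s.2.2.2.2)
        else s
      else s)
    (0, 0, 0, 0, 0)).2.2.2.2

def enhanced_heuristic_alt (state : List (List Int)) : Int :=
  let r := (PySem.List.pyRange 0 4 1).foldl (fun (s : Int × Int) t =>
      let dist := (PySem.List.pyRange 0 4 1).foldl (fun dist j =>
          let v := PySem.List.pyGetD (PySem.List.pyGetD state t []) j 0
          if v ≠ 0 then
            let g := gpAlt v
            dist + (|t - g.1| + |j - g.2|)
          else dist) s.1
      let conf := s.2 + bucketConflicts ((PySem.List.pyRange 0 4 1).map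
          (fun j => PySem.List.pyGetD (PySem.List.pyGetD state t []) j 0)) t 0
      let conf := conf + bucketConflicts ((PySem.List.pyRange 0 4 1).map
          (fun i => PySem.List.pyGetD (PySem.List.pyGetD state i []) t 0)) t 1
      (dist, conf)) ((0 : Int), (0 : Int))
  r.1 + 2 * r.2

-- ===== PRECONDITION & SPEC =====
-- Pre_ excludes exactly the inputs where the Python A raises: shapes without a full first 4x4 block
-- (IndexError) and 4x4 blocks containing a value outside 0..15 (KeyError on the goal-position dict).
def Pre_enhanced_heuristic (state : List (List Int)) : Prop :=
  4 ≤ state.length ∧ ∀ i < 4, 4 ≤ (state.getD i []).length ∧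
    ∀ j < 4, 0 ≤ (state.getD i []).getD j 0 ∧ (state.getD i []).getD j 0 < 16
instance (state : List (List Int)) : Decidable (Pre_enhanced_heuristic state) := by
  unfold Pre_enhanced_heuristic; infer_instance

def pvWitness_enhanced_heuristic : List (List Int) :=
  [[5, 1, 2, 3], [4, 6, 7, 8], [9, 10, 11, 12], [13, 14, 15, 0]]

def Spec_enhanced_heuristic (state : List (List Int)) (out : Int) : Prop :=
  out = enhanced_heuristic_alt state
instance (state : List (List Int)) (out : Int) : Decidable (Spec_enhanced_heuristic state out) := by
  unfold Spec_enhanced_heuristic; infer_instance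

-- ===== CLAIM (what is proved, stated in full; the proofs are below) =====
def Claim_equal_enhanced_heuristic : Prop := ∀ (state : List (List Int)),
  Dom_enhanced_heuristic state → Pre_enhanced_heuristic state →
    Spec_enhanced_heuristic state (enhanced_heuristic state)

-- ===== LEMMAS AND PROOFS =====

-- proof-side helpers: both ports re-expressed as sums over the 4 rows / 4 columns
def gpA (v : Int) : Int × Int := (pvGoalPositions.get? v).getD (0, 0)
def cellS (state : List (List Int)) (i j : Int) : Int :=
  PySem.List.pyGetD (PySem.List.pyGetD state i []) j 0

lemma foldl_shift {α : Type} (l : List α) (F : Int → α → Int) (G : α → Int)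
    (h : ∀ c x, F c x = c + G x) (a : Int) : l.foldl F a = a + (l.map G).sum := by
  have : F = fun c x => c + G x := funext fun c => funext fun x => h c x
  rw [this, PySem.List.foldl_add]

lemma mh_eval (state : List (List Int)) :
    manhattan_heuristic state = 0 + ((PySem.List.pyRange 0 4 1).map (fun i =>
      ((PySem.List.pyRange 0 4 1).map (fun j =>
        if cellS state i j ≠ 0 then
          |i - (gpA (cellS state i j)).1| + |j - (gpA (cellS state i j)).2|
        else 0)).sum)).sum := by
  unfold manhattan_heuristic
  refine foldl_shift _ _ _ (fun dist i => ?_) 0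
  exact foldl_shift (PySem.List.pyRange 0 4 1)
      (fun dist j =>
        let v := PySem.List.pyGetD (PySem.List.pyGetD state i []) j 0
        if v ≠ 0 then
          let g := (pvGoalPositions.get? v).getD (0, 0)
          dist + |i - g.1| + |j - g.2|
        else dist)
      (fun j => if cellS state i j ≠ 0 then
          |i - (gpA (cellS state i j)).1| + |j - (gpA (cellS state i j)).2| else 0)
      (fun c j => by
        simp only [cellS, gpA]
        by_cases h : PySem.List.pyGetD (PySem.List.pyGetD state i []) j 0 ≠ 0 <;>
          · simp [h]
            try ring) dist

-- per-line sum shapes for A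
def rowPair (state : List (List Int)) (i j k : Int) : Int :=
  if (¬ cellS state i k = 0 ∧ (gpA (cellS state i k)).1 = i) ∧
      (gpA (cellS state i k)).2 < (gpA (cellS state i j)).2 then 1 else 0
def rowTerm (state : List (List Int)) (i j : Int) : Int :=
  if ¬ cellS state i j = 0 ∧ (gpA (cellS state i j)).1 = i then
    ((PySem.List.pyRange (j+1) 4 1).map (fun k => rowPair state i j k)).sum
  else 0
def colPair (state : List (List Int)) (j i k : Int) : Int :=
  if (¬ cellS state k j = 0 ∧ (gpA (cellS state k j)).2 = j) ∧
      (gpA (cellS state k j)).1 < (gpA (cellS state i j)).1 then 1 else 0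
def colTerm (state : List (List Int)) (j i : Int) : Int :=
  if ¬ cellS state i j = 0 ∧ (gpA (cellS state i j)).2 = j then
    ((PySem.List.pyRange (i+1) 4 1).map (fun k => colPair state j i k)).sum
  else 0

lemma A_eval (state : List (List Int)) :
    enhanced_heuristic state = manhattan_heuristic state +
      2 * ((0 + ((PySem.List.pyRange 0 4 1).map (fun i =>
              ((PySem.List.pyRange 0 4 1).map (fun j => rowTerm state i j)).sum)).sum) +
           ((PySem.List.pyRange 0 4 1).map (fun j =>
              ((PySem.List.pyRange 0 4 1).map (fun i => colTerm state j i)).sum)).sum) := by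
  have hstep : enhanced_heuristic state = manhattan_heuristic state + 2 *
      ((PySem.List.pyRange 0 4 1).foldl (fun c j =>
      (PySem.List.pyRange 0 4 1).foldl (fun c i =>
        let v := PySem.List.pyGetD (PySem.List.pyGetD state i []) j 0
        if v = 0 then c
        else
          let g := (pvGoalPositions.get? v).getD (0, 0)
          if g.2 = j then
            (PySem.List.pyRange (i+1) 4 1).foldl (fun c k =>
              let w := PySem.List.pyGetD (PySem.List.pyGetD state k []) j 0
              if w ≠ 0 then
                let gk := (pvGoalPositions.get? w).getD (0, 0)
                if gk.2 = j ∧ gk.1 < g.1 then c + 1 else c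
              else c) c
          else c) c)
      ((PySem.List.pyRange 0 4 1).foldl (fun c i =>
      (PySem.List.pyRange 0 4 1).foldl (fun c j =>
        let v := PySem.List.pyGetD (PySem.List.pyGetD state i []) j 0
        if v = 0 then c
        else
          let g := (pvGoalPositions.get? v).getD (0, 0)
          if g.1 = i then
            (PySem.List.pyRange (j+1) 4 1).foldl (fun c k =>
              let w := PySem.List.pyGetD (PySem.List.pyGetD state i []) k 0
              if w ≠ 0 then
                let gk := (pvGoalPositions.get? w).getD (0, 0)
                if gk.1 = i ∧ gk.2 < g.2 then c + 1 else c
              else c) c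
          else c) c) 0)) := rfl
  rw [hstep]
  have hrow : ((PySem.List.pyRange 0 4 1).foldl (fun c i =>
      (PySem.List.pyRange 0 4 1).foldl (fun c j =>
        let v := PySem.List.pyGetD (PySem.List.pyGetD state i []) j 0
        if v = 0 then c
        else
          let g := (pvGoalPositions.get? v).getD (0, 0)
          if g.1 = i then
            (PySem.List.pyRange (j+1) 4 1).foldl (fun c k =>
              let w := PySem.List.pyGetD (PySem.List.pyGetD state i []) k 0
              if w ≠ 0 then
                let gk := (pvGoalPositions.get? w).getD (0, 0)
                if gk.1 = i ∧ gk.2 < g.2 then c + 1 else c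
              else c) c
          else c) c) 0) =
      0 + ((PySem.List.pyRange 0 4 1).map (fun i =>
        ((PySem.List.pyRange 0 4 1).map (fun j => rowTerm state i j)).sum)).sum := by
    refine foldl_shift _ _ _ (fun c i => ?_) 0
    refine foldl_shift _ _ _ (fun c j => ?_) c
    simp only [cellS, gpA, rowTerm, rowPair]
    by_cases h1 : PySem.List.pyGetD (PySem.List.pyGetD state i []) j 0 = 0
    · simp [h1]
    by_cases h2 : ((pvGoalPositions.get? (PySem.List.pyGetD (PySem.List.pyGetD state i []) j 0)).getD (0, 0)).1 = i
    · simp only [h1, h2, not_false_iff, and_true, if_neg, if_pos]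
      rw [foldl_shift _ _ (fun k =>
        if (¬ PySem.List.pyGetD (PySem.List.pyGetD state i []) k 0 = 0 ∧
              ((pvGoalPositions.get? (PySem.List.pyGetD (PySem.List.pyGetD state i []) k 0)).getD (0, 0)).1 = i) ∧
            ((pvGoalPositions.get? (PySem.List.pyGetD (PySem.List.pyGetD state i []) k 0)).getD (0, 0)).2 <
              ((pvGoalPositions.get? (PySem.List.pyGetD (PySem.List.pyGetD state i []) j 0)).getD (0, 0)).2
          then (1:Int) else 0) (fun c k => by beta_reduce; split_ifs <;> omega) c]
      rfl
    · simp [h1, h2]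
  have hcol : ∀ a : Int, ((PySem.List.pyRange 0 4 1).foldl (fun c j =>
      (PySem.List.pyRange 0 4 1).foldl (fun c i =>
        let v := PySem.List.pyGetD (PySem.List.pyGetD state i []) j 0
        if v = 0 then c
        else
          let g := (pvGoalPositions.get? v).getD (0, 0)
          if g.2 = j then
            (PySem.List.pyRange (i+1) 4 1).foldl (fun c k =>
              let w := PySem.List.pyGetD (PySem.List.pyGetD state k []) j 0
              if w ≠ 0 then
                let gk := (pvGoalPositions.get? w).getD (0, 0)
                if gk.2 = j ∧ gk.1 < g.1 then c + 1 else c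
              else c) c
          else c) c) a) =
      a + ((PySem.List.pyRange 0 4 1).map (fun j =>
        ((PySem.List.pyRange 0 4 1).map (fun i => colTerm state j i)).sum)).sum := by
    intro a
    refine foldl_shift _ _ _ (fun c j => ?_) a
    refine foldl_shift _ _ _ (fun c i => ?_) c
    simp only [cellS, gpA, colTerm, colPair]
    by_cases h1 : PySem.List.pyGetD (PySem.List.pyGetD state i []) j 0 = 0
    · simp [h1]
    by_cases h2 : ((pvGoalPositions.get? (PySem.List.pyGetD (PySem.List.pyGetD state i []) j 0)).getD (0, 0)).2 = j
    · simp only [h1, h2, not_false_iff, and_true, if_neg, if_pos]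
      rw [foldl_shift _ _ (fun k =>
        if (¬ PySem.List.pyGetD (PySem.List.pyGetD state k []) j 0 = 0 ∧
              ((pvGoalPositions.get? (PySem.List.pyGetD (PySem.List.pyGetD state k []) j 0)).getD (0, 0)).2 = j) ∧
            ((pvGoalPositions.get? (PySem.List.pyGetD (PySem.List.pyGetD state k []) j 0)).getD (0, 0)).1 <
              ((pvGoalPositions.get? (PySem.List.pyGetD (PySem.List.pyGetD state i []) j 0)).getD (0, 0)).1
          then (1:Int) else 0) (fun c k => by beta_reduce; split_ifs <;> omega) c]
      rfl
    · simp [h1, h2]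
  rw [hrow, hcol]

-- one step of B's counting-register scan, abstracted over the in-line test q and goal index o
def bstep (q : Prop) [Decidable q] (o : Int) (s : Int × Int × Int × Int × Int) :
    Int × Int × Int × Int × Int :=
  if q then
    if o = 0 then
      (s.1 + 1, s.2.1, s.2.2.1, s.2.2.2.1, s.2.2.2.2 + (s.2.1 + s.2.2.1 + s.2.2.2.1))
    else if o = 1 then
      (s.1, s.2.1 + 1, s.2.2.1, s.2.2.2.1, s.2.2.2.2 + (s.2.2.1 + s.2.2.2.1))
    else if o = 2 then
      (s.1, s.2.1, s.2.2.1 + 1, s.2.2.2.1, s.2.2.2.2 + s.2.2.2.1)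
    else
      (s.1, s.2.1, s.2.2.1, s.2.2.2.1 + 1, s.2.2.2.2)
  else s

-- Bool twin of bstep, for the decidable finite core lemma
def bstepB (q : Bool) (o : Int) (s : Int × Int × Int × Int × Int) :
    Int × Int × Int × Int × Int :=
  if q then
    if o = 0 then
      (s.1 + 1, s.2.1, s.2.2.1, s.2.2.2.1, s.2.2.2.2 + (s.2.1 + s.2.2.1 + s.2.2.2.1))
    else if o = 1 then
      (s.1, s.2.1 + 1, s.2.2.1, s.2.2.2.1, s.2.2.2.2 + (s.2.2.1 + s.2.2.2.1))
    else if o = 2 then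
      (s.1, s.2.1, s.2.2.1 + 1, s.2.2.2.1, s.2.2.2.2 + s.2.2.2.1)
    else
      (s.1, s.2.1, s.2.2.1, s.2.2.2.1 + 1, s.2.2.2.2)
  else s

-- A's forward pairwise count over one line, Bool form
def fwd (qa qb qc qd : Bool) (oa ob oc od : Int) : Int :=
  (if qa then (if qb && decide (ob < oa) then (1:Int) else 0) +
      ((if qc && decide (oc < oa) then (1:Int) else 0) + ((if qd && decide (od < oa) then (1:Int) else 0) + 0))
    else 0) +
  ((if qb then (if qc && decide (oc < ob) then (1:Int) else 0) + ((if qd && decide (od < ob) then (1:Int) else 0) + 0)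
    else 0) +
   ((if qc then (if qd && decide (od < oc) then (1:Int) else 0) + 0 else 0) +
    ((if qd then (0:Int) else 0) + 0)))

-- the decidable finite core: forward pairwise count = counting-register scan, all cases
set_option maxHeartbeats 1000000 in
lemma core_fin : ∀ (qa qb qc qd : Bool) (oa ob oc od : Fin 4),
    fwd qa qb qc qd oa.val ob.val oc.val od.val =
    (bstepB qd od.val (bstepB qc oc.val (bstepB qb ob.val (bstepB qa oa.val (0,0,0,0,0))))).2.2.2.2 := by
  decide

lemma bstep_eq (q : Prop) [Decidable q] (o : Int) (s : Int × Int × Int × Int × Int) :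
    bstep q o s = bstepB (decide q) o s := by
  by_cases h : q <;> simp [bstep, bstepB, h]

lemma bstepB_congr (q : Bool) (o o' : Int) (s : Int × Int × Int × Int × Int)
    (h : q = true → o = o') : bstepB q o s = bstepB q o' s := by
  cases q
  · rfl
  · rw [h rfl]

lemma fwd_congr (qa qb qc qd : Bool) (oa ob oc od oa' ob' oc' od' : Int)
    (ha : qa = true → oa = oa') (hb : qb = true → ob = ob')
    (hc : qc = true → oc = oc') (hd : qd = true → od = od') :
    fwd qa qb qc qd oa ob oc od = fwd qa qb qc qd oa' ob' oc' od' := by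
  cases qa <;> cases qb <;> cases qc <;> cases qd <;> simp_all [fwd]

lemma bucket_step_row (line v : Int) (s : Int × Int × Int × Int × Int) :
    (if v ≠ 0 then
        let g := gpAlt v
        if (if (0:Int) = 0 then g.1 else g.2) = line then
          let gpos := if 1 - (0:Int) = 0 then g.1 else g.2
          if gpos = 0 then
            (s.1 + 1, s.2.1, s.2.2.1, s.2.2.2.1, s.2.2.2.2 + (s.2.1 + s.2.2.1 + s.2.2.2.1))
          else if gpos = 1 then
            (s.1, s.2.1 + 1, s.2.2.1, s.2.2.2.1, s.2.2.2.2 + (s.2.2.1 + s.2.2.2.1))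
          else if gpos = 2 then
            (s.1, s.2.1, s.2.2.1 + 1, s.2.2.2.1, s.2.2.2.2 + s.2.2.2.1)
          else
            (s.1, s.2.1, s.2.2.1, s.2.2.2.1 + 1, s.2.2.2.2)
        else s
      else s) =
    bstep (¬ v = 0 ∧ (gpAlt v).1 = line) ((gpAlt v).2) s := by
  by_cases h0 : v = 0
  · simp [bstep, h0]
  · by_cases hg : (gpAlt v).1 = line <;> simp [bstep, h0, hg]

lemma bucket_step_col (line v : Int) (s : Int × Int × Int × Int × Int) :
    (if v ≠ 0 then
        let g := gpAlt v
        if (if (1:Int) = 0 then g.1 else g.2) = line then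
          let gpos := if 1 - (1:Int) = 0 then g.1 else g.2
          if gpos = 0 then
            (s.1 + 1, s.2.1, s.2.2.1, s.2.2.2.1, s.2.2.2.2 + (s.2.1 + s.2.2.1 + s.2.2.2.1))
          else if gpos = 1 then
            (s.1, s.2.1 + 1, s.2.2.1, s.2.2.2.1, s.2.2.2.2 + (s.2.2.1 + s.2.2.2.1))
          else if gpos = 2 then
            (s.1, s.2.1, s.2.2.1 + 1, s.2.2.2.1, s.2.2.2.2 + s.2.2.2.1)
          else
            (s.1, s.2.1, s.2.2.1, s.2.2.2.1 + 1, s.2.2.2.2)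
        else s
      else s) =
    bstep (¬ v = 0 ∧ (gpAlt v).2 = line) ((gpAlt v).1) s := by
  by_cases h0 : v = 0
  · simp [bstep, h0]
  · by_cases hg : (gpAlt v).2 = line <;> simp [bstep, h0, hg]

lemma bc_row_eq (line a b c d : Int) :
    bucketConflicts [a, b, c, d] line 0 =
    (bstep (¬ d = 0 ∧ (gpAlt d).1 = line) ((gpAlt d).2)
     (bstep (¬ c = 0 ∧ (gpAlt c).1 = line) ((gpAlt c).2)
      (bstep (¬ b = 0 ∧ (gpAlt b).1 = line) ((gpAlt b).2)
       (bstep (¬ a = 0 ∧ (gpAlt a).1 = line) ((gpAlt a).2) (0, 0, 0, 0, 0))))).2.2.2.2 := by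
  exact (congrArg (fun s : Int × Int × Int × Int × Int => s.2.2.2.2)
    (PySem.List.foldl_congr_mem [a, b, c, d] _
      (fun s v => bstep (¬ v = 0 ∧ (gpAlt v).1 = line) ((gpAlt v).2) s)
      ((0, 0, 0, 0, 0) : Int × Int × Int × Int × Int)
      (fun acc x _ => bucket_step_row line x acc))).trans rfl

lemma bc_col_eq (line a b c d : Int) :
    bucketConflicts [a, b, c, d] line 1 =
    (bstep (¬ d = 0 ∧ (gpAlt d).2 = line) ((gpAlt d).1)
     (bstep (¬ c = 0 ∧ (gpAlt c).2 = line) ((gpAlt c).1)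
      (bstep (¬ b = 0 ∧ (gpAlt b).2 = line) ((gpAlt b).1)
       (bstep (¬ a = 0 ∧ (gpAlt a).2 = line) ((gpAlt a).1) (0, 0, 0, 0, 0))))).2.2.2.2 := by
  exact (congrArg (fun s : Int × Int × Int × Int × Int => s.2.2.2.2)
    (PySem.List.foldl_congr_mem [a, b, c, d] _
      (fun s v => bstep (¬ v = 0 ∧ (gpAlt v).2 = line) ((gpAlt v).1) s)
      ((0, 0, 0, 0, 0) : Int × Int × Int × Int × Int)
      (fun acc x _ => bucket_step_col line x acc))).trans rfl

lemma gp_bounds (v : Int) (h0 : 0 ≤ v) (h1 : v < 16) (hnz : ¬ v = 0) :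
    (0 ≤ (gpAlt v).1 ∧ (gpAlt v).1 < 4) ∧ (0 ≤ (gpAlt v).2 ∧ (gpAlt v).2 < 4) := by
  interval_cases v
  all_goals first
    | exact absurd rfl hnz
    | decide

-- the forward pairwise count of A equals the backward counting-register scan of B
lemma bucket_core (qa qb qc qd : Prop) [Decidable qa] [Decidable qb] [Decidable qc] [Decidable qd]
    (oa ob oc od : Int)
    (ha : qa → 0 ≤ oa ∧ oa < 4) (hb : qb → 0 ≤ ob ∧ ob < 4)
    (hc : qc → 0 ≤ oc ∧ oc < 4) (hd : qd → 0 ≤ od ∧ od < 4) :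
    (if qa then (if qb ∧ ob < oa then (1:Int) else 0) +
        ((if qc ∧ oc < oa then (1:Int) else 0) + ((if qd ∧ od < oa then (1:Int) else 0) + 0))
      else 0) +
    ((if qb then (if qc ∧ oc < ob then (1:Int) else 0) + ((if qd ∧ od < ob then (1:Int) else 0) + 0)
      else 0) +
     ((if qc then (if qd ∧ od < oc then (1:Int) else 0) + 0 else 0) +
      ((if qd then (0:Int) else 0) + 0))) =
    (bstep qd od (bstep qc oc (bstep qb ob (bstep qa oa (0, 0, 0, 0, 0))))).2.2.2.2 := by
  have mk : ∀ (q : Prop) [Decidable q] (o : Int), (q → 0 ≤ o ∧ o < 4) →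
      ∃ f : Fin 4, q → (f.val : Int) = o := by
    intro q _ o h
    by_cases hq : q
    · exact ⟨⟨o.toNat, by have := h hq; omega⟩, fun _ => by
        have := h hq; simp; omega⟩
    · exact ⟨0, fun hq' => absurd hq' hq⟩
  obtain ⟨fa, hfa⟩ := mk qa oa ha
  obtain ⟨fb, hfb⟩ := mk qb ob hb
  obtain ⟨fc, hfc⟩ := mk qc oc hc
  obtain ⟨fd, hfd⟩ := mk qd od hd
  have h1 : (if qa then (if qb ∧ ob < oa then (1:Int) else 0) +
        ((if qc ∧ oc < oa then (1:Int) else 0) + ((if qd ∧ od < oa then (1:Int) else 0) + 0))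
      else 0) +
    ((if qb then (if qc ∧ oc < ob then (1:Int) else 0) + ((if qd ∧ od < ob then (1:Int) else 0) + 0)
      else 0) +
     ((if qc then (if qd ∧ od < oc then (1:Int) else 0) + 0 else 0) +
      ((if qd then (0:Int) else 0) + 0))) =
      fwd (decide qa) (decide qb) (decide qc) (decide qd) oa ob oc od := by
    simp [fwd]
  rw [h1, fwd_congr (decide qa) (decide qb) (decide qc) (decide qd) oa ob oc od
        fa.val fb.val fc.val fd.val
        (fun h => (hfa (of_decide_eq_true h)).symm) (fun h => (hfb (of_decide_eq_true h)).symm)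
        (fun h => (hfc (of_decide_eq_true h)).symm) (fun h => (hfd (of_decide_eq_true h)).symm),
      core_fin (decide qa) (decide qb) (decide qc) (decide qd) fa fb fc fd,
      bstepB_congr (decide qa) fa.val oa _ (fun h => hfa (of_decide_eq_true h)),
      bstepB_congr (decide qb) fb.val ob _ (fun h => hfb (of_decide_eq_true h)),
      bstepB_congr (decide qc) fc.val oc _ (fun h => hfc (of_decide_eq_true h)),
      bstepB_congr (decide qd) fd.val od _ (fun h => hfd (of_decide_eq_true h)),
      ← bstep_eq qa oa, ← bstep_eq qb ob, ← bstep_eq qc oc, ← bstep_eq qd od]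

lemma bucket_line_row (line a b c d : Int)
    (hA : 0 ≤ a ∧ a < 16) (hB : 0 ≤ b ∧ b < 16) (hC : 0 ≤ c ∧ c < 16) (hD : 0 ≤ d ∧ d < 16) :
    (if ¬ a = 0 ∧ (gpAlt a).1 = line then
        (if (¬ b = 0 ∧ (gpAlt b).1 = line) ∧ (gpAlt b).2 < (gpAlt a).2 then (1:Int) else 0) +
        ((if (¬ c = 0 ∧ (gpAlt c).1 = line) ∧ (gpAlt c).2 < (gpAlt a).2 then (1:Int) else 0) +
         ((if (¬ d = 0 ∧ (gpAlt d).1 = line) ∧ (gpAlt d).2 < (gpAlt a).2 then (1:Int) else 0) + 0))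
      else 0) +
    ((if ¬ b = 0 ∧ (gpAlt b).1 = line then
        (if (¬ c = 0 ∧ (gpAlt c).1 = line) ∧ (gpAlt c).2 < (gpAlt b).2 then (1:Int) else 0) +
        ((if (¬ d = 0 ∧ (gpAlt d).1 = line) ∧ (gpAlt d).2 < (gpAlt b).2 then (1:Int) else 0) + 0)
      else 0) +
     ((if ¬ c = 0 ∧ (gpAlt c).1 = line then
        (if (¬ d = 0 ∧ (gpAlt d).1 = line) ∧ (gpAlt d).2 < (gpAlt c).2 then (1:Int) else 0) + 0
       else 0) +
      ((if ¬ d = 0 ∧ (gpAlt d).1 = line then (0:Int) else 0) + 0))) =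
    bucketConflicts [a, b, c, d] line 0 := by
  have h := bucket_core (¬ a = 0 ∧ (gpAlt a).1 = line) (¬ b = 0 ∧ (gpAlt b).1 = line)
      (¬ c = 0 ∧ (gpAlt c).1 = line) (¬ d = 0 ∧ (gpAlt d).1 = line)
      ((gpAlt a).2) ((gpAlt b).2) ((gpAlt c).2) ((gpAlt d).2)
      (fun hq => (gp_bounds a hA.1 hA.2 hq.1).2) (fun hq => (gp_bounds b hB.1 hB.2 hq.1).2)
      (fun hq => (gp_bounds c hC.1 hC.2 hq.1).2) (fun hq => (gp_bounds d hD.1 hD.2 hq.1).2)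
  rw [bc_row_eq]
  exact h

lemma bucket_line_col (line a b c d : Int)
    (hA : 0 ≤ a ∧ a < 16) (hB : 0 ≤ b ∧ b < 16) (hC : 0 ≤ c ∧ c < 16) (hD : 0 ≤ d ∧ d < 16) :
    (if ¬ a = 0 ∧ (gpAlt a).2 = line then
        (if (¬ b = 0 ∧ (gpAlt b).2 = line) ∧ (gpAlt b).1 < (gpAlt a).1 then (1:Int) else 0) +
        ((if (¬ c = 0 ∧ (gpAlt c).2 = line) ∧ (gpAlt c).1 < (gpAlt a).1 then (1:Int) else 0) +
         ((if (¬ d = 0 ∧ (gpAlt d).2 = line) ∧ (gpAlt d).1 < (gpAlt a).1 then (1:Int) else 0) + 0))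
      else 0) +
    ((if ¬ b = 0 ∧ (gpAlt b).2 = line then
        (if (¬ c = 0 ∧ (gpAlt c).2 = line) ∧ (gpAlt c).1 < (gpAlt b).1 then (1:Int) else 0) +
        ((if (¬ d = 0 ∧ (gpAlt d).2 = line) ∧ (gpAlt d).1 < (gpAlt b).1 then (1:Int) else 0) + 0)
      else 0) +
     ((if ¬ c = 0 ∧ (gpAlt c).2 = line then
        (if (¬ d = 0 ∧ (gpAlt d).2 = line) ∧ (gpAlt d).1 < (gpAlt c).1 then (1:Int) else 0) + 0
       else 0) +
      ((if ¬ d = 0 ∧ (gpAlt d).2 = line then (0:Int) else 0) + 0))) =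
    bucketConflicts [a, b, c, d] line 1 := by
  have h := bucket_core (¬ a = 0 ∧ (gpAlt a).2 = line) (¬ b = 0 ∧ (gpAlt b).2 = line)
      (¬ c = 0 ∧ (gpAlt c).2 = line) (¬ d = 0 ∧ (gpAlt d).2 = line)
      ((gpAlt a).1) ((gpAlt b).1) ((gpAlt c).1) ((gpAlt d).1)
      (fun hq => (gp_bounds a hA.1 hA.2 hq.1).1) (fun hq => (gp_bounds b hB.1 hB.2 hq.1).1)
      (fun hq => (gp_bounds c hC.1 hC.2 hq.1).1) (fun hq => (gp_bounds d hD.1 hD.2 hq.1).1)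
  rw [bc_col_eq]
  exact h

lemma B_eval (state : List (List Int)) :
    enhanced_heuristic_alt state =
      (0 + ((PySem.List.pyRange 0 4 1).map (fun t =>
        ((PySem.List.pyRange 0 4 1).map (fun j =>
          if cellS state t j ≠ 0 then
            |t - (gpAlt (cellS state t j)).1| + |j - (gpAlt (cellS state t j)).2|
          else 0)).sum)).sum) +
      2 * (0 + ((PySem.List.pyRange 0 4 1).map (fun t =>
        bucketConflicts ((PySem.List.pyRange 0 4 1).map (fun j => cellS state t j)) t 0 +
        bucketConflicts ((PySem.List.pyRange 0 4 1).map (fun i => cellS state i t)) t 1)).sum) := by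
  have hpair : (PySem.List.pyRange 0 4 1).foldl (fun (s : Int × Int) t =>
      let dist := (PySem.List.pyRange 0 4 1).foldl (fun dist j =>
          let v := PySem.List.pyGetD (PySem.List.pyGetD state t []) j 0
          if v ≠ 0 then
            let g := gpAlt v
            dist + (|t - g.1| + |j - g.2|)
          else dist) s.1
      let conf := s.2 + bucketConflicts ((PySem.List.pyRange 0 4 1).map
          (fun j => PySem.List.pyGetD (PySem.List.pyGetD state t []) j 0)) t 0
      let conf := conf + bucketConflicts ((PySem.List.pyRange 0 4 1).map
          (fun i => PySem.List.pyGetD (PySem.List.pyGetD state i []) t 0)) t 1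
      (dist, conf)) ((0 : Int), (0 : Int)) =
      ((PySem.List.pyRange 0 4 1).foldl (fun dist t =>
        (PySem.List.pyRange 0 4 1).foldl (fun dist j =>
          let v := PySem.List.pyGetD (PySem.List.pyGetD state t []) j 0
          if v ≠ 0 then
            let g := gpAlt v
            dist + (|t - g.1| + |j - g.2|)
          else dist) dist) 0,
       (PySem.List.pyRange 0 4 1).foldl (fun conf t =>
        conf + bucketConflicts ((PySem.List.pyRange 0 4 1).map
          (fun j => PySem.List.pyGetD (PySem.List.pyGetD state t []) j 0)) t 0 +
        bucketConflicts ((PySem.List.pyRange 0 4 1).map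
          (fun i => PySem.List.pyGetD (PySem.List.pyGetD state i []) t 0)) t 1) 0) := by
    exact PySem.List.foldl_prod_mk
      (fun dist t =>
        (PySem.List.pyRange 0 4 1).foldl (fun dist j =>
          let v := PySem.List.pyGetD (PySem.List.pyGetD state t []) j 0
          if v ≠ 0 then
            let g := gpAlt v
            dist + (|t - g.1| + |j - g.2|)
          else dist) dist)
      (fun conf t =>
        conf + bucketConflicts ((PySem.List.pyRange 0 4 1).map
          (fun j => PySem.List.pyGetD (PySem.List.pyGetD state t []) j 0)) t 0 +
        bucketConflicts ((PySem.List.pyRange 0 4 1).map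
          (fun i => PySem.List.pyGetD (PySem.List.pyGetD state i []) t 0)) t 1)
      (PySem.List.pyRange 0 4 1) 0 0
  refine (congrArg (fun p : Int × Int => p.1 + 2 * p.2) hpair).trans ?_
  have hdist : (PySem.List.pyRange 0 4 1).foldl (fun dist t =>
      (PySem.List.pyRange 0 4 1).foldl (fun dist j =>
        let v := PySem.List.pyGetD (PySem.List.pyGetD state t []) j 0
        if v ≠ 0 then
          let g := gpAlt v
          dist + (|t - g.1| + |j - g.2|)
        else dist) dist) 0 =
      0 + ((PySem.List.pyRange 0 4 1).map (fun t =>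
        ((PySem.List.pyRange 0 4 1).map (fun j =>
          if cellS state t j ≠ 0 then
            |t - (gpAlt (cellS state t j)).1| + |j - (gpAlt (cellS state t j)).2|
          else 0)).sum)).sum := by
    refine foldl_shift _ _ _ (fun dist t => ?_) 0
    refine foldl_shift _ _ _ (fun c j => ?_) dist
    simp only [cellS]
    by_cases h : PySem.List.pyGetD (PySem.List.pyGetD state t []) j 0 ≠ 0 <;> simp [h]
  have hconf : (PySem.List.pyRange 0 4 1).foldl (fun conf t =>
      conf + bucketConflicts ((PySem.List.pyRange 0 4 1).map
        (fun j => PySem.List.pyGetD (PySem.List.pyGetD state t []) j 0)) t 0 +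
      bucketConflicts ((PySem.List.pyRange 0 4 1).map
        (fun i => PySem.List.pyGetD (PySem.List.pyGetD state i []) t 0)) t 1) 0 =
      0 + ((PySem.List.pyRange 0 4 1).map (fun t =>
        bucketConflicts ((PySem.List.pyRange 0 4 1).map (fun j => cellS state t j)) t 0 +
        bucketConflicts ((PySem.List.pyRange 0 4 1).map (fun i => cellS state i t)) t 1)).sum := by
    refine foldl_shift _ _ _ (fun c t => ?_) 0
    simp only [cellS]
    ring
  simp only [hdist, hconf]

lemma gp_eq (v : Int) (h0 : 0 ≤ v) (h1 : v < 16) :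
    (pvGoalPositions.get? v).getD (0, 0) = gpAlt v := by
  interval_cases v <;> rfl

lemma agree_on_pre (state : List (List Int))
    (hpre : 4 ≤ state.length ∧ ∀ i < 4, 4 ≤ (state.getD i []).length ∧
      ∀ j < 4, 0 ≤ (state.getD i []).getD j 0 ∧ (state.getD i []).getD j 0 < 16) :
    enhanced_heuristic state = enhanced_heuristic_alt state := by
  obtain ⟨hlen, hall⟩ := hpre
  rw [A_eval, B_eval, mh_eval]
  simp only [show PySem.List.pyRange 0 4 1 = [0,1,2,3] from rfl,
    show PySem.List.pyRange ((0:Int)+1) 4 1 = [1,2,3] from rfl,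
    show PySem.List.pyRange ((1:Int)+1) 4 1 = [2,3] from rfl,
    show PySem.List.pyRange ((2:Int)+1) 4 1 = [3] from rfl,
    show PySem.List.pyRange ((3:Int)+1) 4 1 = ([] : List Int) from rfl,
    List.map_cons, List.map_nil, List.sum_cons, List.sum_nil,
    rowTerm, rowPair, colTerm, colPair, cellS, gpA, PySem.List.pyGetD_ofNat']
  have hb : ∀ i < 4, ∀ j < 4, 0 ≤ (state.getD i []).getD j 0 ∧ (state.getD i []).getD j 0 < 16 :=
    fun i hi j hj => (hall i hi).2 j hj
  rw [gp_eq _ (hb 0 (by norm_num) 0 (by norm_num)).1 (hb 0 (by norm_num) 0 (by norm_num)).2,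
      gp_eq _ (hb 0 (by norm_num) 1 (by norm_num)).1 (hb 0 (by norm_num) 1 (by norm_num)).2,
      gp_eq _ (hb 0 (by norm_num) 2 (by norm_num)).1 (hb 0 (by norm_num) 2 (by norm_num)).2,
      gp_eq _ (hb 0 (by norm_num) 3 (by norm_num)).1 (hb 0 (by norm_num) 3 (by norm_num)).2,
      gp_eq _ (hb 1 (by norm_num) 0 (by norm_num)).1 (hb 1 (by norm_num) 0 (by norm_num)).2,
      gp_eq _ (hb 1 (by norm_num) 1 (by norm_num)).1 (hb 1 (by norm_num) 1 (by norm_num)).2,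
      gp_eq _ (hb 1 (by norm_num) 2 (by norm_num)).1 (hb 1 (by norm_num) 2 (by norm_num)).2,
      gp_eq _ (hb 1 (by norm_num) 3 (by norm_num)).1 (hb 1 (by norm_num) 3 (by norm_num)).2,
      gp_eq _ (hb 2 (by norm_num) 0 (by norm_num)).1 (hb 2 (by norm_num) 0 (by norm_num)).2,
      gp_eq _ (hb 2 (by norm_num) 1 (by norm_num)).1 (hb 2 (by norm_num) 1 (by norm_num)).2,
      gp_eq _ (hb 2 (by norm_num) 2 (by norm_num)).1 (hb 2 (by norm_num) 2 (by norm_num)).2,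
      gp_eq _ (hb 2 (by norm_num) 3 (by norm_num)).1 (hb 2 (by norm_num) 3 (by norm_num)).2,
      gp_eq _ (hb 3 (by norm_num) 0 (by norm_num)).1 (hb 3 (by norm_num) 0 (by norm_num)).2,
      gp_eq _ (hb 3 (by norm_num) 1 (by norm_num)).1 (hb 3 (by norm_num) 1 (by norm_num)).2,
      gp_eq _ (hb 3 (by norm_num) 2 (by norm_num)).1 (hb 3 (by norm_num) 2 (by norm_num)).2,
      gp_eq _ (hb 3 (by norm_num) 3 (by norm_num)).1 (hb 3 (by norm_num) 3 (by norm_num)).2]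
  rw [bucket_line_row 0 _ _ _ _ (hb 0 (by norm_num) 0 (by norm_num)) (hb 0 (by norm_num) 1 (by norm_num)) (hb 0 (by norm_num) 2 (by norm_num)) (hb 0 (by norm_num) 3 (by norm_num)),
      bucket_line_row 1 _ _ _ _ (hb 1 (by norm_num) 0 (by norm_num)) (hb 1 (by norm_num) 1 (by norm_num)) (hb 1 (by norm_num) 2 (by norm_num)) (hb 1 (by norm_num) 3 (by norm_num)),
      bucket_line_row 2 _ _ _ _ (hb 2 (by norm_num) 0 (by norm_num)) (hb 2 (by norm_num) 1 (by norm_num)) (hb 2 (by norm_num) 2 (by norm_num)) (hb 2 (by norm_num) 3 (by norm_num)),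
      bucket_line_row 3 _ _ _ _ (hb 3 (by norm_num) 0 (by norm_num)) (hb 3 (by norm_num) 1 (by norm_num)) (hb 3 (by norm_num) 2 (by norm_num)) (hb 3 (by norm_num) 3 (by norm_num)),
      bucket_line_col 0 _ _ _ _ (hb 0 (by norm_num) 0 (by norm_num)) (hb 1 (by norm_num) 0 (by norm_num)) (hb 2 (by norm_num) 0 (by norm_num)) (hb 3 (by norm_num) 0 (by norm_num)),
      bucket_line_col 1 _ _ _ _ (hb 0 (by norm_num) 1 (by norm_num)) (hb 1 (by norm_num) 1 (by norm_num)) (hb 2 (by norm_num) 1 (by norm_num)) (hb 3 (by norm_num) 1 (by norm_num)),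
      bucket_line_col 2 _ _ _ _ (hb 0 (by norm_num) 2 (by norm_num)) (hb 1 (by norm_num) 2 (by norm_num)) (hb 2 (by norm_num) 2 (by norm_num)) (hb 3 (by norm_num) 2 (by norm_num)),
      bucket_line_col 3 _ _ _ _ (hb 0 (by norm_num) 3 (by norm_num)) (hb 1 (by norm_num) 3 (by norm_num)) (hb 2 (by norm_num) 3 (by norm_num)) (hb 3 (by norm_num) 3 (by norm_num))]
  ring

-- ===== VERDICT (by name: the statement is the Claim_ definition above) =====
theorem enhanced_heuristic_spec : Claim_equal_enhanced_heuristic := by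
  intro state hdom hpre
  unfold Spec_enhanced_heuristic
  exact agree_on_pre state hpre
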